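-- pv_equiv track=rewrite | github.com/mdaashir/Yavar-Hackathon-2025-Mohamed-Aashir-S | src/extraction/table_extractor.py | _map_header_to_column
-- ===== SOURCE A (Python) =====
-- def _map_header_to_column(header_text: str) -> str | None:
--     """Map detected header text to standard column names"""
--     header_text = header_text.lower()
--
--     if any(word in header_text for word in ['item', 'desc', 'product']):
--         return 'description'
--     elif any(word in header_text for word in ['hsn', 'sac', 'code']):
--         return 'hsn_sac'
--     elif any(word in header_text for word in ['qty', 'quantity']):
--         return 'quantity'
--     elif any(word in header_text for word in ['price', 'rate', 'unit']):
--         return 'unit_price'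
--     elif any(word in header_text for word in ['amount', 'total', 'value']):
--         return 'total_amount'
--     elif any(word in header_text for word in ['sr', 'no', '#']):
--         return 'serial_number'
--     return None
-- ===== SOURCE B (Python) =====
-- _KEYWORD_COLUMN = {
--     'item': (0, 'description'), 'desc': (0, 'description'), 'product': (0, 'description'),
--     'hsn': (1, 'hsn_sac'), 'sac': (1, 'hsn_sac'), 'code': (1, 'hsn_sac'),
--     'qty': (2, 'quantity'), 'quantity': (2, 'quantity'),
--     'price': (3, 'unit_price'), 'rate': (3, 'unit_price'), 'unit': (3, 'unit_price'),
--     'amount': (4, 'total_amount'), 'total': (4, 'total_amount'), 'value': (4, 'total_amount'),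
--     'sr': (5, 'serial_number'), 'no': (5, 'serial_number'), '#': (5, 'serial_number'),
-- }
--
-- def _map_header_to_column(header_text: str) -> str | None:
--     """Map detected header text to standard column names"""
--     text = header_text.lower()
--     best = None
--     for word, (rank, column) in _KEYWORD_COLUMN.items():
--         if word in text and (best is None or rank < best[0]):
--             best = (rank, column)
--     return best[1] if best is not None else None
-- ===== Notes on version B (the rewrite author's own statement) =====
-- stated objective: alternative
-- what changed: Replaces the six-branch if/elif cascade with a min-rank search: a flat keyword-to-(rank,column) map is scanned once keeping the lowest-ranked matching keyword in an accumulator (no early return, no per-group any()); the minimum rank reproduces the cascade's priority.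
import Mathlib
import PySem

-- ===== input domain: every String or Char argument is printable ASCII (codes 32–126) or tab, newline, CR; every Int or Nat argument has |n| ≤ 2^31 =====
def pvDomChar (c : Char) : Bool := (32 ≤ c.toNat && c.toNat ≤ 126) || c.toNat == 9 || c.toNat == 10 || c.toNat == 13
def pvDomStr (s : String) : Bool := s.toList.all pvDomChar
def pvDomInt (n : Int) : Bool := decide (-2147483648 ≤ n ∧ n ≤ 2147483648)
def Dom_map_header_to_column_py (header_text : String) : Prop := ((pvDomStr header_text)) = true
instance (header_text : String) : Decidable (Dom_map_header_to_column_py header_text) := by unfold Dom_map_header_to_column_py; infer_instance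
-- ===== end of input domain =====

-- ===== PORT A =====
-- B changes: the if/elif cascade becomes a min-rank fold over a flat keyword→(rank,column) map (alternative decomposition)
def map_header_to_column_py (header_text : String) : Option String :=
  let t := PySem.Str.lower header_text
  if ["item", "desc", "product"].any (fun word => PySem.Str.isIn word t) then
    some "description"
  else if ["hsn", "sac", "code"].any (fun word => PySem.Str.isIn word t) then
    some "hsn_sac"
  else if ["qty", "quantity"].any (fun word => PySem.Str.isIn word t) then
    some "quantity"
  else if ["price", "rate", "unit"].any (fun word => PySem.Str.isIn word t) then
    some "unit_price"
  else if ["amount", "total", "value"].any (fun word => PySem.Str.isIn word t) then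
    some "total_amount"
  else if ["sr", "no", "#"].any (fun word => PySem.Str.isIn word t) then
    some "serial_number"
  else
    none

-- ===== PORT B =====
-- flat keyword → (rank, column) map, in Source B's insertion order
def pvKeywordColumn : List (String × Int × String) :=
  [("item", 0, "description"), ("desc", 0, "description"), ("product", 0, "description"),
   ("hsn", 1, "hsn_sac"), ("sac", 1, "hsn_sac"), ("code", 1, "hsn_sac"),
   ("qty", 2, "quantity"), ("quantity", 2, "quantity"),
   ("price", 3, "unit_price"), ("rate", 3, "unit_price"), ("unit", 3, "unit_price"),
   ("amount", 4, "total_amount"), ("total", 4, "total_amount"), ("value", 4, "total_amount"),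
   ("sr", 5, "serial_number"), ("no", 5, "serial_number"), ("#", 5, "serial_number")]

-- the loop body: keep the lowest-ranked matching keyword seen so far
def pvStep (text : String) (best : Option (Int × String)) (p : String × Int × String) :
    Option (Int × String) :=
  if PySem.Str.isIn p.1 text &&
     (match best with | none => true | some b => decide (p.2.1 < b.1)) then
    some p.2
  else best

def map_header_to_column_py_alt (header_text : String) : Option String :=
  let text := PySem.Str.lower header_text
  let best := pvKeywordColumn.foldl (pvStep text) none
  best.map Prod.snd

-- ===== PRECONDITION & SPEC =====
def Spec_map_header_to_column_py (header_text : String) (out : Option String) : Prop := out = map_header_to_column_py_alt header_text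
instance (header_text : String) (out : Option String) : Decidable (Spec_map_header_to_column_py header_text out) := by unfold Spec_map_header_to_column_py; infer_instance

-- ===== CLAIM (what is proved, stated in full; the proofs are below) =====
def Claim_equal_map_header_to_column_py : Prop := ∀ (header_text : String), Dom_map_header_to_column_py header_text → Spec_map_header_to_column_py header_text (map_header_to_column_py header_text)

-- ===== LEMMAS AND PROOFS =====

-- once the accumulator holds a rank no later element beats, the fold is constant
theorem pvAbsorb (t : String) (l : List (String × Int × String)) (r0 : Int) (c0 : String)
    (h : ∀ p ∈ l, r0 ≤ p.2.1) :
    List.foldl (pvStep t) (some (r0, c0)) l = some (r0, c0) := by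
  induction l with
  | nil => rfl
  | cons p l ih =>
    have hp : r0 ≤ p.2.1 := h p (by simp)
    have : pvStep t (some (r0, c0)) p = some (r0, c0) := by
      simp [pvStep, show ¬ (p.2.1 < r0) by omega]
    rw [List.foldl_cons, this]
    exact ih (fun q hq => h q (by simp [hq]))

-- on a rank-nondecreasing list, the min-rank fold is the first match
theorem pvFold_eq_find (t : String) (l : List (String × Int × String))
    (h : l.Pairwise (fun p q => p.2.1 ≤ q.2.1)) :
    List.foldl (pvStep t) none l = (l.find? (fun p => PySem.Str.isIn p.1 t)).map (fun p => p.2) := by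
  induction l with
  | nil => rfl
  | cons p l ih =>
    rcases List.pairwise_cons.mp h with ⟨hall, hl⟩
    rw [List.foldl_cons]
    by_cases hm : PySem.Str.isIn p.1 t
    · simp only [PySem.Str.isIn] at hm
      have hs : pvStep t none p = some (p.2.1, p.2.2) := by simp [pvStep, PySem.Str.isIn, hm]
      rw [hs, pvAbsorb t l p.2.1 p.2.2 hall]
      simp [List.find?, PySem.Str.isIn, hm]
    · simp only [PySem.Str.isIn, Bool.not_eq_true] at hm
      have hs : pvStep t none p = none := by simp [pvStep, PySem.Str.isIn, hm]
      rw [hs, ih hl]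
      simp [List.find?, PySem.Str.isIn, hm]

theorem pvFoldMain (t : String) :
    List.foldl (pvStep t) none pvKeywordColumn =
      (pvKeywordColumn.find? (fun p => PySem.Str.isIn p.1 t)).map (fun p => p.2) :=
  pvFold_eq_find t _ (by decide)

set_option maxHeartbeats 1000000 in
-- ===== VERDICT (by name: the statement is the Claim_ definition above) =====
theorem map_header_to_column_py_spec : Claim_equal_map_header_to_column_py := by
  intro t _
  unfold Spec_map_header_to_column_py map_header_to_column_py map_header_to_column_py_alt
  simp only [pvFoldMain]
  by_cases h1 : PySem.Chars.isIn ['i', 't', 'e', 'm'] (PySem.Chars.lower t.toList) = true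
  · simp [pvKeywordColumn, List.find?, List.any, h1]
  by_cases h2 : PySem.Chars.isIn ['d', 'e', 's', 'c'] (PySem.Chars.lower t.toList) = true
  · simp [pvKeywordColumn, List.find?, List.any, h1, h2]
  by_cases h3 : PySem.Chars.isIn ['p', 'r', 'o', 'd', 'u', 'c', 't'] (PySem.Chars.lower t.toList) = true
  · simp [pvKeywordColumn, List.find?, List.any, h1, h2, h3]
  by_cases h4 : PySem.Chars.isIn ['h', 's', 'n'] (PySem.Chars.lower t.toList) = true
  · simp [pvKeywordColumn, List.find?, List.any, h1, h2, h3, h4]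
  by_cases h5 : PySem.Chars.isIn ['s', 'a', 'c'] (PySem.Chars.lower t.toList) = true
  · simp [pvKeywordColumn, List.find?, List.any, h1, h2, h3, h4, h5]
  by_cases h6 : PySem.Chars.isIn ['c', 'o', 'd', 'e'] (PySem.Chars.lower t.toList) = true
  · simp [pvKeywordColumn, List.find?, List.any, h1, h2, h3, h4, h5, h6]
  by_cases h7 : PySem.Chars.isIn ['q', 't', 'y'] (PySem.Chars.lower t.toList) = true
  · simp [pvKeywordColumn, List.find?, List.any, h1, h2, h3, h4, h5, h6, h7]
  by_cases h8 : PySem.Chars.isIn ['q', 'u', 'a', 'n', 't', 'i', 't', 'y'] (PySem.Chars.lower t.toList) = true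
  · simp [pvKeywordColumn, List.find?, List.any, h1, h2, h3, h4, h5, h6, h7, h8]
  by_cases h9 : PySem.Chars.isIn ['p', 'r', 'i', 'c', 'e'] (PySem.Chars.lower t.toList) = true
  · simp [pvKeywordColumn, List.find?, List.any, h1, h2, h3, h4, h5, h6, h7, h8, h9]
  by_cases h10 : PySem.Chars.isIn ['r', 'a', 't', 'e'] (PySem.Chars.lower t.toList) = true
  · simp [pvKeywordColumn, List.find?, List.any, h1, h2, h3, h4, h5, h6, h7, h8, h9, h10]
  by_cases h11 : PySem.Chars.isIn ['u', 'n', 'i', 't'] (PySem.Chars.lower t.toList) = true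
  · simp [pvKeywordColumn, List.find?, List.any, h1, h2, h3, h4, h5, h6, h7, h8, h9, h10, h11]
  by_cases h12 : PySem.Chars.isIn ['a', 'm', 'o', 'u', 'n', 't'] (PySem.Chars.lower t.toList) = true
  · simp [pvKeywordColumn, List.find?, List.any, h1, h2, h3, h4, h5, h6, h7, h8, h9, h10, h11, h12]
  by_cases h13 : PySem.Chars.isIn ['t', 'o', 't', 'a', 'l'] (PySem.Chars.lower t.toList) = true
  · simp [pvKeywordColumn, List.find?, List.any, h1, h2, h3, h4, h5, h6, h7, h8, h9, h10, h11, h12, h13]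
  by_cases h14 : PySem.Chars.isIn ['v', 'a', 'l', 'u', 'e'] (PySem.Chars.lower t.toList) = true
  · simp [pvKeywordColumn, List.find?, List.any, h1, h2, h3, h4, h5, h6, h7, h8, h9, h10, h11, h12, h13, h14]
  by_cases h15 : PySem.Chars.isIn ['s', 'r'] (PySem.Chars.lower t.toList) = true
  · simp [pvKeywordColumn, List.find?, List.any, h1, h2, h3, h4, h5, h6, h7, h8, h9, h10, h11, h12, h13, h14, h15]
  by_cases h16 : PySem.Chars.isIn ['n', 'o'] (PySem.Chars.lower t.toList) = true
  · simp [pvKeywordColumn, List.find?, List.any, h1, h2, h3, h4, h5, h6, h7, h8, h9, h10, h11, h12, h13, h14, h15, h16]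
  by_cases h17 : PySem.Chars.isIn ['#'] (PySem.Chars.lower t.toList) = true
  · simp [pvKeywordColumn, List.find?, List.any, h1, h2, h3, h4, h5, h6, h7, h8, h9, h10, h11, h12, h13, h14, h15, h16, h17]
  simp [pvKeywordColumn, List.find?, List.any, h1, h2, h3, h4, h5, h6, h7, h8, h9, h10, h11, h12, h13, h14, h15, h16, h17]
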